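-- pv_equiv track=rewrite | github.com/Rene7e7/ReneTubiera-asixc1B-m03 | proves/UF3 Recu/A1. Fitxers E_S Exercici Reforç Se debe hacer asi/filtración de palabras según una condición específica ( Terminacion )/filtrar_palabras.py | filtrar_palabras
-- ===== SOURCE A (Python) =====
-- import string
--
-- def filtrar_palabras(lineas):
--     palabras_terminacion = []
--     otras_palabras = []
--
--     # Caracteres especiales que queremos eliminar
--     caracteres_especiales = string.punctuation + '¿¡' + '“”'  # Añade aquí cualquier otro carácter especial que desees eliminar
--
--     # Lo que se hace es recorrer las líneas
--     for linea in lineas: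
--         # Se divide la línea en palabras
--         palabras = linea.split()
--         # Se recorren las palabras
--         for palabra in palabras:
--             # Eliminar caracteres especiales de la palabra
--             palabra_limpia = ''.join(caracter for caracter in palabra if caracter not in caracteres_especiales)
--             # Se comprueba si la palabra termina en 'ción'
--             if palabra_limpia.endswith('al'):
--                 # Si termina en 'ción' se añade a la lista de palabras_terminacion
--                 palabras_terminacion.append(palabra_limpia)
--             else:
--                 # Si no termina en 'ción' se añade a la lista de otras_palabras
--                 otras_palabras.append(palabra_limpia)
--     # Se retornan las listas
--     return palabras_terminacion, otras_palabras
-- ===== SOURCE B (Python) =====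
-- import string
--
-- _ESPECIALES = set(string.punctuation + '¿¡' + '“”')
--
-- def filtrar_palabras(lineas):
--     # Streaming character scanner: instead of split() + per-word cleaning join,
--     # cut and clean tokens in a single pass over the characters of each line.
--     palabras_terminacion = []
--     otras_palabras = []
--     for linea in lineas:
--         buf = []          # cleaned characters of the current token
--         en_token = False  # saw at least one non-space character in the current token
--         for c in linea + ' ':   # trailing sentinel space flushes the last token
--             if c.isspace():
--                 if en_token:
--                     palabra = ''.join(buf)
--                     if palabra.endswith('al'):
--                         palabras_terminacion.append(palabra)
--                     else:
--                         otras_palabras.append(palabra)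
--                     buf = []
--                     en_token = False
--             else:
--                 en_token = True
--                 if c not in _ESPECIALES:
--                     buf.append(c)
--     return palabras_terminacion, otras_palabras
-- ===== Notes on version B (the rewrite author's own statement) =====
-- stated objective: alternative
-- what changed: Replaces split()-per-line plus a per-word cleaning join with a single streaming character scanner per line that maintains a cleaned token buffer and an in-token flag and flushes tokens at whitespace (sentinel space at end of line).
import Mathlib
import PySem

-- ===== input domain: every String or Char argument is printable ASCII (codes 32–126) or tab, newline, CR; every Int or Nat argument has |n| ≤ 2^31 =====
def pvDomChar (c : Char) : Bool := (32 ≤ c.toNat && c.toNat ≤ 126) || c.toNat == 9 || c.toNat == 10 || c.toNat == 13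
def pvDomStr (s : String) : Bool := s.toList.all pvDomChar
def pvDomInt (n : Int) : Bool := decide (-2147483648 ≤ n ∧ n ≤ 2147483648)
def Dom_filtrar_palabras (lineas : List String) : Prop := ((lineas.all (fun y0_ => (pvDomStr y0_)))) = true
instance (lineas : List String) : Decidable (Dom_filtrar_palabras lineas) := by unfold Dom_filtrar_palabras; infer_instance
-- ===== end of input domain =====

-- B replaces A's split()-then-clean-each-word nested loop by a single streaming
-- character scanner per line (token buffer + flag, sentinel space flushes);
-- objective: alternative decomposition, same cost. Return-value equivalence only.

-- ===== PORT A =====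
-- string.punctuation + '¿¡' + '“”', shared verbatim by both Pythons
def pvEspeciales : String := "!\"#$%&'()*+,-./:;<=>?@[\\]^_`{|}~¿¡“”"

-- ''.join(caracter for caracter in palabra if caracter not in caracteres_especiales)
def pvLimpiar (palabra : String) : String :=
  String.ofList (palabra.toList.filter (fun c => !(pvEspeciales.toList.contains c)))

def filtrar_palabras (lineas : List String) : List String × List String :=
  lineas.foldl
    (fun acc linea =>
      (PySem.Str.split₀ linea).foldl
        (fun acc2 palabra =>
          let palabra_limpia := pvLimpiar palabra
          if PySem.Str.endswith palabra_limpia "al" then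
            (acc2.1 ++ [palabra_limpia], acc2.2)
          else
            (acc2.1, acc2.2 ++ [palabra_limpia]))
        acc)
    ([], [])

-- ===== PORT B =====
-- one character step of Source B's scanner: state = ((term, otras), (buf, en_token))
def pvStep (st : (List String × List String) × List Char × Bool) (c : Char) :
    (List String × List String) × List Char × Bool :=
  if PySem.Chars.isspace c then
    if st.2.2 then
      let palabra := String.ofList st.2.1
      (if PySem.Str.endswith palabra "al" then (st.1.1 ++ [palabra], st.1.2)
       else (st.1.1, st.1.2 ++ [palabra]),
       ([], false))
    else st
  else
    (st.1, (if pvEspeciales.toList.contains c then st.2.1 else st.2.1 ++ [c], true))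

def filtrar_palabras_alt (lineas : List String) : List String × List String :=
  lineas.foldl
    (fun acc linea => ((linea.toList ++ [' ']).foldl pvStep (acc, ([], false))).1)
    ([], [])

-- ===== PRECONDITION & SPEC =====
def Spec_filtrar_palabras (lineas : List String) (out : List String × List String) : Prop := out = filtrar_palabras_alt lineas
instance (lineas : List String) (out : List String × List String) : Decidable (Spec_filtrar_palabras lineas out) := by unfold Spec_filtrar_palabras; infer_instance

-- ===== CLAIM =====
def Claim_equal_filtrar_palabras : Prop := ∀ (lineas : List String), Dom_filtrar_palabras lineas → Spec_filtrar_palabras lineas (filtrar_palabras lineas)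

-- ===== LEMMAS AND PROOFS =====

-- A's inner word-classifying step, as a named function (proof helper)
def pvStepA (acc2 : List String × List String) (palabra : String) : List String × List String :=
  let palabra_limpia := pvLimpiar palabra
  if PySem.Str.endswith palabra_limpia "al" then (acc2.1 ++ [palabra_limpia], acc2.2)
  else (acc2.1, acc2.2 ++ [palabra_limpia])

theorem pv_go_acc (cs : List Char) (cur : List Char) (acc : List (List Char)) :
    PySem.Chars.split₀.go cs cur acc = acc.reverse ++ PySem.Chars.split₀.go cs cur [] := by
  induction cs generalizing cur acc with
  | nil =>
    by_cases h : cur.isEmpty <;> simp [PySem.Chars.split₀.go, h]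
  | cons c rest ih =>
    by_cases hs : PySem.Chars.isspace c
    · by_cases h : cur.isEmpty
      · simp only [PySem.Chars.split₀.go, hs, h, if_true]
        exact ih [] acc
      · simp only [PySem.Chars.split₀.go, hs, h, if_true, if_false, Bool.false_eq_true]
        rw [ih [] (cur.reverse :: acc), ih [] [cur.reverse]]
        simp
    · simp only [PySem.Chars.split₀.go, hs, Bool.false_eq_true, if_false]
      exact ih _ _

-- the scanner on cs ++ [' '], started mid-token with raw prefix cur (reversed),
-- equals A's word loop over the words split₀ still finds
theorem pv_scan (cs : List Char) (cur : List Char) (p : List String × List String) :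
    ((cs ++ [' ']).foldl pvStep
      (p, (cur.reverse.filter (fun c => !(pvEspeciales.toList.contains c)), !cur.isEmpty))).1
    = ((PySem.Chars.split₀.go cs cur []).map String.ofList).foldl pvStepA p := by
  induction cs generalizing cur p with
  | nil =>
    by_cases h : cur.isEmpty
    · simp [PySem.Chars.split₀.go, h, pvStep, PySem.Chars.isspace]
    · simp [PySem.Chars.split₀.go, h, pvStep, pvStepA, pvLimpiar, PySem.Chars.isspace]
  | cons c rest ih =>
    by_cases hs : PySem.Chars.isspace c
    · by_cases h : cur.isEmpty
      · have hc : cur = [] := by cases cur <;> simp_all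
        subst hc
        simpa [PySem.Chars.split₀.go, hs, pvStep] using ih [] p
      · simp only [List.cons_append, List.foldl_cons, pvStep, hs, h, Bool.not_false, if_true]
        rw [show PySem.Chars.split₀.go (c :: rest) cur [] = PySem.Chars.split₀.go rest [] [cur.reverse] by
              simp [PySem.Chars.split₀.go, hs, h],
            pv_go_acc rest [] [cur.reverse]]
        simpa [pvStepA, pvLimpiar] using ih [] (pvStepA p (String.ofList cur.reverse))
    · simp only [List.cons_append, List.foldl_cons, pvStep, hs, Bool.false_eq_true, if_false]
      have := ih (c :: cur) p
      simp only [List.reverse_cons, List.filter_append, List.isEmpty_cons, Bool.not_false] at this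
      rw [show PySem.Chars.split₀.go (c :: rest) cur [] = PySem.Chars.split₀.go rest (c :: cur) [] by
            simp [PySem.Chars.split₀.go, hs]]
      by_cases he : c ∈ pvEspeciales.toList
      · simpa [he] using this
      · simpa [he] using this

-- per line: B's scanner pass equals A's split-then-classify pass
theorem pv_linea (linea : String) (acc : List String × List String) :
    ((linea.toList ++ [' ']).foldl pvStep (acc, ([], false))).1
    = (PySem.Str.split₀ linea).foldl pvStepA acc := by
  have := pv_scan linea.toList [] acc
  simpa [PySem.Str.split₀, PySem.Chars.split₀] using this

theorem pv_fold (lineas : List String) (acc : List String × List String) :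
    lineas.foldl
      (fun acc linea => ((linea.toList ++ [' ']).foldl pvStep (acc, ([], false))).1) acc
    = lineas.foldl (fun acc linea => (PySem.Str.split₀ linea).foldl pvStepA acc) acc := by
  induction lineas generalizing acc with
  | nil => rfl
  | cons l ls ih => rw [List.foldl_cons, List.foldl_cons, pv_linea]; exact ih _

-- ===== VERDICT =====
theorem filtrar_palabras_spec : Claim_equal_filtrar_palabras := by
  intro lineas _
  unfold Spec_filtrar_palabras filtrar_palabras filtrar_palabras_alt
  rw [pv_fold]
  rfl
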